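-- pv_equiv track=rewrite | github.com/TjuAachen/Leetcode_Log | 2361-minimum-costs-using-the-train-line/2361-minimum-costs-using-the-train-line.py | minimumCosts
-- ===== SOURCE A (Python) =====
-- from typing import List
--
-- def minimumCosts(regular: List[int], express: List[int], expressCost: int) -> List[int]:
--     n = len(regular) + 1
--     costExpress = [0] * n
--     costRegular = [0] * n
--     costExpress[0] = expressCost
--     ans = [0] * (n - 1)
--
--     for idx in range(1, n):
--         costRegular[idx] = min([costRegular[idx - 1] + regular[idx - 1], costExpress[idx - 1] + regular[idx - 1], costExpress[idx - 1] + express[idx - 1]])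
--         costExpress[idx] = min([costExpress[idx - 1] + express[idx - 1], costRegular[idx - 1] + regular[idx - 1] + expressCost, costRegular[idx - 1] + expressCost + express[idx - 1]])
--
--         ans[idx - 1] = min(costRegular[idx], costExpress[idx])
--
--     return ans
-- ===== SOURCE B (Python) =====
-- def minimumCosts(regular, express, expressCost):
--     # Top-down memoized recursion over the stop index instead of A's bottom-up
--     # fill of three preallocated arrays: state(i) is the pair (cheapest arrival
--     # at stop i on the regular line, cheapest on the express line), with the
--     # express transition folded to r + expressCost + min(rg, ex).
--     memo = {0: (0, expressCost)}
--     def state(i):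
--         if i not in memo:
--             r, e = state(i - 1)
--             rg, ex = regular[i - 1], express[i - 1]
--             memo[i] = (min(min(r, e) + rg, e + ex),
--                        min(e + ex, r + expressCost + min(rg, ex)))
--         return memo[i]
--     return [min(state(i)) for i in range(1, len(regular) + 1)]
-- ===== Notes on version B (the rewrite author's own statement) =====
-- stated objective: alternative
-- what changed: Replaces A's bottom-up fill of three preallocated index-addressed arrays with top-down memoized recursion over the stop index: a recursive state(i) returning the (regular, express) arrival-cost pair with the express transition folded to r + expressCost + min(rg, ex), and the answer built as a comprehension of min(state(i)).
import Mathlib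
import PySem

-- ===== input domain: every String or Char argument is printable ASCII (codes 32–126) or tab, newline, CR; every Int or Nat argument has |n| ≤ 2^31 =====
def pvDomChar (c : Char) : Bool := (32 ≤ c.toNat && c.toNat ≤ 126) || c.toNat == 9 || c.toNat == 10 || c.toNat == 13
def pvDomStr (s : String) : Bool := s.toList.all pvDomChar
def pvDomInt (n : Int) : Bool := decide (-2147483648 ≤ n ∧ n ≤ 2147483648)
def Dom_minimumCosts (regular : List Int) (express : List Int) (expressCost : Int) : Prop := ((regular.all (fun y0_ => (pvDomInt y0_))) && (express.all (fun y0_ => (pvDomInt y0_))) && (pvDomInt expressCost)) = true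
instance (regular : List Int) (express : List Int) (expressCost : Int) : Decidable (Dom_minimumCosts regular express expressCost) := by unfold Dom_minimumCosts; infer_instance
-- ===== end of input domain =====

-- B replaces A's bottom-up fill of three arrays with top-down recursion over the stop
-- index (memoization in Source B is a cache and does not change values; objective: alternative).

-- ===== PORT A =====
def minimumCosts (regular : List Int) (express : List Int) (expressCost : Int) : List Int :=
  let n : Nat := regular.length + 1
  let costExpress := PySem.List.pySetD (List.replicate n (0 : Int)) 0 expressCost
  let costRegular := List.replicate n (0 : Int)
  let ans := List.replicate (n - 1) (0 : Int)
  let final := (PySem.List.pyRange 1 (n : Int) 1).foldl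
    (fun (st : List Int × List Int × List Int) idx =>
      let cE := st.1
      let cR := st.2.1
      let an := st.2.2
      let rPrev := PySem.List.pyGetD cR (idx - 1) 0
      let ePrev := PySem.List.pyGetD cE (idx - 1) 0
      let rg := PySem.List.pyGetD regular (idx - 1) 0
      let ex := PySem.List.pyGetD express (idx - 1) 0
      let newR := (PySem.List.min? [rPrev + rg, ePrev + rg, ePrev + ex] (fun y => y)).getD 0
      let newE := (PySem.List.min? [ePrev + ex, rPrev + rg + expressCost, rPrev + expressCost + ex] (fun y => y)).getD 0
      (PySem.List.pySetD cE idx newE, PySem.List.pySetD cR idx newR,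
       PySem.List.pySetD an (idx - 1) (min newR newE)))
    (costExpress, costRegular, ans)
  final.2.2

-- ===== PORT B =====
-- B's recursive helper state(i): (regular, express) arrival-cost pair at stop i.
-- regular[i-1]/express[i-1] carry a nonnegative in-range index for every call B makes
-- under Pre_ (i-1 < len(regular) ≤ len(express)), so List.getD is exact there.
def stateB (regular : List Int) (express : List Int) (expressCost : Int) : Nat → Int × Int
  | 0 => (0, expressCost)
  | i + 1 =>
    let p := stateB regular express expressCost i
    let rg := regular.getD i 0
    let ex := express.getD i 0
    (min (min p.1 p.2 + rg) (p.2 + ex),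
     min (p.2 + ex) (p.1 + expressCost + min rg ex))

def minimumCosts_alt (regular : List Int) (express : List Int) (expressCost : Int) : List Int :=
  (List.range regular.length).map (fun j =>
    min (stateB regular express expressCost (j + 1)).1
        (stateB regular express expressCost (j + 1)).2)

-- ===== PRECONDITION & SPEC =====
-- Pre_: A indexes express[idx-1] for idx-1 < len(regular); when express is shorter
-- than regular Python raises IndexError (B raises there too), so exactly those
-- inputs are excluded.
def Pre_minimumCosts (regular : List Int) (express : List Int) (expressCost : Int) : Prop :=
  regular.length ≤ express.length
instance (regular : List Int) (express : List Int) (expressCost : Int) : Decidable (Pre_minimumCosts regular express expressCost) := by unfold Pre_minimumCosts; infer_instance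
def pvWitness_minimumCosts : List Int × List Int × Int := ([1, 7], [3, 2], 4)

def Spec_minimumCosts (regular : List Int) (express : List Int) (expressCost : Int) (out : List Int) : Prop := out = minimumCosts_alt regular express expressCost
instance (regular : List Int) (express : List Int) (expressCost : Int) (out : List Int) : Decidable (Spec_minimumCosts regular express expressCost out) := by unfold Spec_minimumCosts; infer_instance

-- ===== CLAIM (what is proved, stated in full; the proofs are below) =====
def Claim_equal_minimumCosts : Prop := ∀ (regular : List Int) (express : List Int) (expressCost : Int), Dom_minimumCosts regular express expressCost → Pre_minimumCosts regular express expressCost → Spec_minimumCosts regular express expressCost (minimumCosts regular express expressCost)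

-- ===== LEMMAS AND PROOFS =====

-- The contents of A's three arrays after k loop iterations, expressed via B's state.
def fE (rs es : List Int) (X : Int) (k j : Nat) : Int :=
  if j ≤ k then (stateB rs es X j).2 else 0
def fR (rs es : List Int) (X : Int) (k j : Nat) : Int :=
  if j ≤ k then (stateB rs es X j).1 else 0
def fA (rs es : List Int) (X : Int) (k j : Nat) : Int :=
  if j < k then min (stateB rs es X (j + 1)).1 (stateB rs es X (j + 1)).2 else 0

lemma A_inv (rs es : List Int) (X : Int) (h : rs.length ≤ es.length) :
    ∀ k, k ≤ rs.length →
    ((PySem.List.pyRange 1 ((k : Int) + 1) 1).foldl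
      (fun (st : List Int × List Int × List Int) idx =>
        let cE := st.1
        let cR := st.2.1
        let an := st.2.2
        let rPrev := PySem.List.pyGetD cR (idx - 1) 0
        let ePrev := PySem.List.pyGetD cE (idx - 1) 0
        let rg := PySem.List.pyGetD rs (idx - 1) 0
        let ex := PySem.List.pyGetD es (idx - 1) 0
        let newR := (PySem.List.min? [rPrev + rg, ePrev + rg, ePrev + ex] (fun y => y)).getD 0
        let newE := (PySem.List.min? [ePrev + ex, rPrev + rg + X, rPrev + X + ex] (fun y => y)).getD 0
        (PySem.List.pySetD cE idx newE, PySem.List.pySetD cR idx newR,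
         PySem.List.pySetD an (idx - 1) (min newR newE)))
      (PySem.List.pySetD (List.replicate (rs.length + 1) (0 : Int)) 0 X,
       List.replicate (rs.length + 1) (0 : Int),
       List.replicate (rs.length + 1 - 1) (0 : Int))) =
    ((List.range (rs.length + 1)).map (fE rs es X k),
     (List.range (rs.length + 1)).map (fR rs es X k),
     (List.range rs.length).map (fA rs es X k)) := by
  intro k hk
  induction k with
  | zero =>
    rw [PySem.List.pyRange_one_eq_nil (by norm_num)]
    simp only [List.foldl_nil]
    refine congrArg₂ _ ?_ (congrArg₂ _ ?_ ?_)
    · have h0 : PySem.List.pySetD (List.replicate (rs.length + 1) (0 : Int)) 0 X =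
          (List.replicate (rs.length + 1) (0 : Int)).set 0 X := by
        rw [PySem.List.pySetD_of_nonneg]; · rfl
        · norm_num
      rw [h0]
      apply List.ext_getElem
      · simp
      · intro i h1 h2
        simp only [List.getElem_set, List.getElem_replicate, List.getElem_map,
          List.getElem_range, fE]
        split_ifs with hi hj hj
        · simp [← hi, stateB]
        · omega
        · omega
        · rfl
    · apply List.ext_getElem
      · simp
      · intro i h1 h2
        simp only [List.getElem_replicate, List.getElem_map, List.getElem_range, fR]
        split_ifs with hi
        · have : i = 0 := by omega
          simp [this, stateB]
        · rfl
    · apply List.ext_getElem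
      · simp
      · intro i h1 h2
        simp [fA]
  | succ k ihk =>
    have hk' : k ≤ rs.length := by omega
    have hkL : k < rs.length := by omega
    have hkE : k < es.length := by omega
    have hsplit : PySem.List.pyRange 1 ((↑(k + 1) : Int) + 1) 1 =
        PySem.List.pyRange 1 ((k : Int) + 1) 1 ++ [(k : Int) + 1] := by
      have := PySem.List.pyRange_one_succ_right (a := 1) (b := (k : Int) + 1) (by omega)
      push_cast
      rw [this]
    rw [hsplit, List.foldl_append, ihk hk']
    simp only [List.foldl_cons, List.foldl_nil]
    have hsub : ((k : Int) + 1) - 1 = (k : Int) := by ring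
    have hmin3 : ∀ a b c : Int, (PySem.List.min? [a, b, c] (fun y => y)).getD 0 = min (min a b) c := by
      intro a b c
      rw [PySem.List.min?_id_cons]
      simp [List.foldl]
    have hgR : PySem.List.pyGetD ((List.range (rs.length + 1)).map (fR rs es X k)) (((k : Int) + 1) - 1) 0 = (stateB rs es X k).1 := by
      rw [hsub, PySem.List.pyGetD_natCast]
      have hk1 : k < rs.length + 1 := by omega
      simp [List.getD_eq_getElem?_getD, hk1, fR]
    have hgE : PySem.List.pyGetD ((List.range (rs.length + 1)).map (fE rs es X k)) (((k : Int) + 1) - 1) 0 = (stateB rs es X k).2 := by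
      rw [hsub, PySem.List.pyGetD_natCast]
      have hk1 : k < rs.length + 1 := by omega
      simp [List.getD_eq_getElem?_getD, hk1, fE]
    have hgrs : PySem.List.pyGetD rs (((k : Int) + 1) - 1) 0 = rs[k] := by
      rw [hsub, PySem.List.pyGetD_natCast, List.getD_eq_getElem?_getD]
      simp [List.getElem?_eq_getElem hkL]
    have hges : PySem.List.pyGetD es (((k : Int) + 1) - 1) 0 = es[k] := by
      rw [hsub, PySem.List.pyGetD_natCast, List.getD_eq_getElem?_getD]
      simp [List.getElem?_eq_getElem hkE]
    have hgrs' : rs.getD k 0 = rs[k] := by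
      rw [List.getD_eq_getElem?_getD]; simp [List.getElem?_eq_getElem hkL]
    have hges' : es.getD k 0 = es[k] := by
      rw [List.getD_eq_getElem?_getD]; simp [List.getElem?_eq_getElem hkE]
    have hRE : stateB rs es X (k + 1) =
        (min (min (stateB rs es X k).1 (stateB rs es X k).2 + rs[k]) ((stateB rs es X k).2 + es[k]),
         min ((stateB rs es X k).2 + es[k]) ((stateB rs es X k).1 + X + min rs[k] es[k])) := by
      conv_lhs => rw [stateB]
      rw [hgrs', hges']
    have hnewR : min (min ((stateB rs es X k).1 + rs[k]) ((stateB rs es X k).2 + rs[k])) ((stateB rs es X k).2 + es[k]) =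
        (stateB rs es X (k + 1)).1 := by rw [hRE]; dsimp; omega
    have hnewE : min (min ((stateB rs es X k).2 + es[k]) ((stateB rs es X k).1 + rs[k] + X)) ((stateB rs es X k).1 + X + es[k]) =
        (stateB rs es X (k + 1)).2 := by rw [hRE]; dsimp; omega
    rw [hgR, hgE, hgrs, hges, hmin3, hmin3, hnewR, hnewE]
    have hcast : ((k : Int) + 1) = ((k + 1 : Nat) : Int) := by push_cast; ring
    refine congrArg₂ _ ?_ (congrArg₂ _ ?_ ?_)
    · rw [hcast, PySem.List.pySetD_natCast]
      apply List.ext_getElem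
      · simp
      · intro i h1 h2
        simp only [List.getElem_set, List.getElem_map, List.getElem_range, fE]
        split_ifs with hi h1 h2 h3 h4
        · rw [← hi]
        · omega
        · rfl
        · omega
        · omega
        · rfl
    · rw [hcast, PySem.List.pySetD_natCast]
      apply List.ext_getElem
      · simp
      · intro i h1 h2
        simp only [List.getElem_set, List.getElem_map, List.getElem_range, fR]
        split_ifs with hi h1 h2 h3 h4
        · rw [← hi]
        · omega
        · rfl
        · omega
        · omega
        · rfl
    · rw [hsub, PySem.List.pySetD_natCast]
      apply List.ext_getElem
      · simp
      · intro i h1 h2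
        simp only [List.getElem_set, List.getElem_map, List.getElem_range, fA]
        split_ifs with hi h1 h2 h3 h4
        · rw [← hi]
        · omega
        · rfl
        · omega
        · omega
        · rfl

theorem minimumCosts_spec : Claim_equal_minimumCosts := by
  intro rs es X hdom hpre
  unfold Spec_minimumCosts
  have hpre' : rs.length ≤ es.length := hpre
  have hA := A_inv rs es X hpre' rs.length le_rfl
  have hred : minimumCosts rs es X =
      ((PySem.List.pyRange 1 ((rs.length + 1 : Nat) : Int) 1).foldl
        (fun (st : List Int × List Int × List Int) idx =>
          let cE := st.1
          let cR := st.2.1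
          let an := st.2.2
          let rPrev := PySem.List.pyGetD cR (idx - 1) 0
          let ePrev := PySem.List.pyGetD cE (idx - 1) 0
          let rg := PySem.List.pyGetD rs (idx - 1) 0
          let ex := PySem.List.pyGetD es (idx - 1) 0
          let newR := (PySem.List.min? [rPrev + rg, ePrev + rg, ePrev + ex] (fun y => y)).getD 0
          let newE := (PySem.List.min? [ePrev + ex, rPrev + rg + X, rPrev + X + ex] (fun y => y)).getD 0
          (PySem.List.pySetD cE idx newE, PySem.List.pySetD cR idx newR,
           PySem.List.pySetD an (idx - 1) (min newR newE)))
        (PySem.List.pySetD (List.replicate (rs.length + 1) (0 : Int)) 0 X,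
         List.replicate (rs.length + 1) (0 : Int),
         List.replicate (rs.length + 1 - 1) (0 : Int))).2.2 := rfl
  have hcast : ((rs.length + 1 : Nat) : Int) = ((rs.length : Nat) : Int) + 1 := by push_cast; ring
  rw [hred, hcast, hA]
  unfold minimumCosts_alt
  apply List.map_congr_left
  intro j hj
  have hjL : j < rs.length := List.mem_range.mp hj
  simp [fA, hjL]
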